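-- pv_equiv track=rewrite | github.com/jahnaviramu/AITextTransformer | assignment1_text_transformer.py | parse_transformer_output
-- ===== SOURCE A (Python) =====
-- def parse_transformer_output(output_string: str) -> dict:
--     """
--     Parses the string output from the transformer into structured format.
--
--     Args:
--         output_string: Raw string output from the LLM chain
--
--     Returns:
--         Dictionary containing summary, tone, and improved_version
--     """
--     sections = {
--         'summary': '',
--         'tone': '',
--         'improved_version': ''
--     }
--
--     # Split output into sections
--     current_section = None
--     current_content = []
--
--     for line in output_string.split('\n'):
--         line = line.strip()
--
--         if line.startswith('SUMMARY:'):
--             if current_section and current_content: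
--                 sections[current_section] = '\n'.join(current_content).strip()
--             current_section = 'summary'
--             current_content = []
--         elif line.startswith('TONE:'):
--             if current_section and current_content:
--                 sections[current_section] = '\n'.join(current_content).strip()
--             current_section = 'tone'
--             current_content = []
--         elif line.startswith('IMPROVED VERSION:'):
--             if current_section and current_content:
--                 sections[current_section] = '\n'.join(current_content).strip()
--             current_section = 'improved_version'
--             current_content = []
--         elif line and current_section:
--             current_content.append(line)
--
--     # Don't forget the last section
--     if current_section and current_content:
--         sections[current_section] = '\n'.join(current_content).strip()
--
--     return sections
-- ===== SOURCE B (Python) =====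
-- def parse_transformer_output(output_string: str) -> dict:
--     markers = [('SUMMARY:', 'summary'), ('TONE:', 'tone'), ('IMPROVED VERSION:', 'improved_version')]
--
--     def header(line):
--         for prefix, name in markers:
--             if line.startswith(prefix):
--                 return name
--         return None
--
--     def split_at_header(ls):
--         # (lines before the first header, the rest starting at that header)
--         k = 0
--         while k < len(ls) and header(ls[k]) is None:
--             k += 1
--         return ls[:k], ls[k:]
--
--     lines = [l.strip() for l in output_string.split('\n')]
--     sections = {'summary': '', 'tone': '', 'improved_version': ''}
--     _, rest = split_at_header(lines)
--     while rest:
--         name = header(rest[0])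
--         body, rest = split_at_header(rest[1:])
--         content = [l for l in body if l]
--         if content:
--             sections[name] = '\n'.join(content).strip()
--     return sections
-- ===== Notes on version B (the rewrite author's own statement) =====
-- stated objective: alternative
-- what changed: Replaced A's single pass with an inline flush-on-transition accumulator (current_section/current_content mutated per line) by a two-phase scanner: strip all lines once, skip the preamble, then repeatedly split off a header and the span of lines up to the next header and assign that block if its non-empty lines are non-empty.
import Mathlib
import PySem

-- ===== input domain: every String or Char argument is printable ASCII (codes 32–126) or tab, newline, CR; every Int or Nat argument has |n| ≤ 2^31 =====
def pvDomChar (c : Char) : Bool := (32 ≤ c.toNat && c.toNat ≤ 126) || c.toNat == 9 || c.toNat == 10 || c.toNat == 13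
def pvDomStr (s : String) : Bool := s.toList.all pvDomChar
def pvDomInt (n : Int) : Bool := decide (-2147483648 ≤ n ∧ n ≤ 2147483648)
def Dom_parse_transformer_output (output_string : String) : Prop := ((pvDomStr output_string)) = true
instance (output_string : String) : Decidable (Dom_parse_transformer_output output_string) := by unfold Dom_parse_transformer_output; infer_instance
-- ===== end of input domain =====

-- B re-decomposes A's inline flush-on-transition accumulator into a two-phase scanner
-- (index the next header with a span helper, then assign each block); objective: alternative, equal cost.

-- ===== PORT A =====
-- the repeated flush block 'if current_section and current_content: sections[current_section] = ...'
-- (the three section names are non-empty literals, so 'current_section' truthy = 'is not None')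
def pvFlushA (cur : Option String) (content : List String)
    (sections : PySem.Dict String String) : PySem.Dict String String :=
  match cur with
  | none => sections
  | some c =>
    if content = [] then sections
    else sections.insert c (PySem.Str.strip (PySem.Str.join "\n" content))

-- the loop body of A: strip the line, then the elif chain
def pvStepA (st : Option String × List String × PySem.Dict String String)
    (line0 : String) : Option String × List String × PySem.Dict String String :=
  let line := PySem.Str.strip line0
  if PySem.Str.startswith line "SUMMARY:" then
    (some "summary", [], pvFlushA st.1 st.2.1 st.2.2)
  else if PySem.Str.startswith line "TONE:" then
    (some "tone", [], pvFlushA st.1 st.2.1 st.2.2)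
  else if PySem.Str.startswith line "IMPROVED VERSION:" then
    (some "improved_version", [], pvFlushA st.1 st.2.1 st.2.2)
  else if line ≠ "" ∧ st.1.isSome then
    (st.1, st.2.1 ++ [line], st.2.2)
  else st

def parse_transformer_output (output_string : String) : List (String × String) :=
  let sections : PySem.Dict String String :=
    PySem.Dict.ofList [("summary", ""), ("tone", ""), ("improved_version", "")]
  -- output_string.split('\n'): sep "\n" ≠ "", so split? is always some; getD [] never fires
  let st := ((PySem.Str.split? output_string "\n").getD []).foldl pvStepA (none, [], sections)
  (pvFlushA st.1 st.2.1 st.2.2).items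

-- ===== PORT B =====
def pvMarkers : List (String × String) :=
  [("SUMMARY:", "summary"), ("TONE:", "tone"), ("IMPROVED VERSION:", "improved_version")]

-- B's helper 'header': first marker the line starts with
def pvHeader? (line : String) : Option String :=
  pvMarkers.findSome? (fun m => if PySem.Str.startswith line m.1 then some m.2 else none)

def pvNoHeader (line : String) : Bool := (pvHeader? line).isNone

-- B's helper 'split_at_header' is List.span pvNoHeader; B's second while loop:
def pvBGo (rest : List String) (sections : PySem.Dict String String) : PySem.Dict String String :=
  match rest with
  | [] => sections
  | l :: ls =>
    -- loop invariant of B: rest starts with a header line, so 'header(rest[0])' is a name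
    let name := (pvHeader? l).getD ""
    let s := ls.span pvNoHeader
    let content := s.1.filter (fun x => x ≠ "")
    pvBGo s.2
      (if content = [] then sections
       else sections.insert name (PySem.Str.strip (PySem.Str.join "\n" content)))
termination_by rest.length
decreasing_by
  simp only [List.span_eq_takeWhile_dropWhile]
  exact Nat.lt_succ_of_le (List.length_dropWhile_le _ _)

def parse_transformer_output_alt (output_string : String) : List (String × String) :=
  let lines := ((PySem.Str.split? output_string "\n").getD []).map PySem.Str.strip
  let sections : PySem.Dict String String :=
    PySem.Dict.ofList [("summary", ""), ("tone", ""), ("improved_version", "")]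
  (pvBGo (lines.span pvNoHeader).2 sections).items

-- ===== PRECONDITION & SPEC =====
def Spec_parse_transformer_output (output_string : String) (out : List (String × String)) : Prop := out = parse_transformer_output_alt output_string
instance (output_string : String) (out : List (String × String)) : Decidable (Spec_parse_transformer_output output_string out) := by unfold Spec_parse_transformer_output; infer_instance

-- ===== CLAIM (what is proved, stated in full; the proofs are below) =====
def Claim_equal_parse_transformer_output : Prop := ∀ (output_string : String), Dom_parse_transformer_output output_string → Spec_parse_transformer_output output_string (parse_transformer_output output_string)

-- ===== LEMMAS AND PROOFS =====

-- A's loop body on an already-stripped line (proof-side restatement of pvStepA)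
def pvStepS (st : Option String × List String × PySem.Dict String String)
    (line : String) : Option String × List String × PySem.Dict String String :=
  if PySem.Str.startswith line "SUMMARY:" then
    (some "summary", [], pvFlushA st.1 st.2.1 st.2.2)
  else if PySem.Str.startswith line "TONE:" then
    (some "tone", [], pvFlushA st.1 st.2.1 st.2.2)
  else if PySem.Str.startswith line "IMPROVED VERSION:" then
    (some "improved_version", [], pvFlushA st.1 st.2.1 st.2.2)
  else if line ≠ "" ∧ st.1.isSome then
    (st.1, st.2.1 ++ [line], st.2.2)
  else st

-- pvHeader? written as A's elif chain
theorem pvHeader?_chain (l : String) :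
    pvHeader? l =
      if PySem.Str.startswith l "SUMMARY:" then some "summary"
      else if PySem.Str.startswith l "TONE:" then some "tone"
      else if PySem.Str.startswith l "IMPROVED VERSION:" then some "improved_version"
      else none := by
  simp only [pvHeader?, pvMarkers, List.findSome?]
  split_ifs <;> simp_all

-- pvStepS cased on pvHeader?
theorem pvStepS_char (st : Option String × List String × PySem.Dict String String)
    (l : String) :
    pvStepS st l =
      match pvHeader? l with
      | some name => (some name, [], pvFlushA st.1 st.2.1 st.2.2)
      | none => if l ≠ "" ∧ st.1.isSome then (st.1, st.2.1 ++ [l], st.2.2) else st := by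
  rw [pvHeader?_chain]
  simp only [pvStepS]
  split_ifs <;> rfl

-- the section-collecting phase: from a header-open state, A's fold + final flush
-- equals "span off the block, assign it if non-empty, continue at the next header"
theorem pvCollect (ls : List String) : ∀ (name : String) (acc : List String)
    (d : PySem.Dict String String),
    (fun st => pvFlushA st.1 st.2.1 st.2.2) (ls.foldl pvStepS (some name, acc, d)) =
      pvBGo (ls.span pvNoHeader).2
        (if acc ++ (ls.span pvNoHeader).1.filter (fun x => x ≠ "") = [] then d
         else d.insert name (PySem.Str.strip (PySem.Str.join "\n"
           (acc ++ (ls.span pvNoHeader).1.filter (fun x => x ≠ ""))))) := by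
  induction ls with
  | nil =>
    intro name acc d
    simp [pvBGo, pvFlushA]
  | cons l t ih =>
    intro name acc d
    rcases hp : pvHeader? l with _ | m
    · -- not a header line: it is (possibly) collected, span extends
      have hnh : pvNoHeader l = true := by simp [pvNoHeader, hp]
      simp only [List.foldl_cons, pvStepS_char, hp, List.span_eq_takeWhile_dropWhile,
        List.takeWhile_cons, List.dropWhile_cons, hnh, if_true]
      by_cases he : l = ""
      · subst he
        simpa [List.span_eq_takeWhile_dropWhile] using ih name acc d
      · simp only [he, ne_eq, not_false_iff, true_and, Option.isSome_some, if_true]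
        simpa [List.span_eq_takeWhile_dropWhile, he] using ih name (acc ++ [l]) d
    · -- a header line: flush, start the next block
      have hnh : pvNoHeader l = false := by simp [pvNoHeader, hp]
      simp only [List.foldl_cons, pvStepS_char, hp, List.span_eq_takeWhile_dropWhile,
        List.takeWhile_cons, List.dropWhile_cons, hnh]
      rw [pvBGo.eq_def]
      simpa [pvFlushA, List.span_eq_takeWhile_dropWhile, hp]
        using ih m [] (pvFlushA (some name) acc d)

-- the preamble-skipping phase: with no section open, A's fold ignores non-header
-- lines, and once a header appears pvCollect takes over — exactly B's structure
theorem pvTop (ls : List String) : ∀ (d : PySem.Dict String String),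
    (fun st => pvFlushA st.1 st.2.1 st.2.2) (ls.foldl pvStepS (none, [], d)) =
      pvBGo (ls.dropWhile pvNoHeader) d := by
  induction ls with
  | nil => intro d; simp [pvBGo, pvFlushA]
  | cons l t ih =>
    intro d
    rcases hp : pvHeader? l with _ | m
    · have hnh : pvNoHeader l = true := by simp [pvNoHeader, hp]
      simp only [List.foldl_cons, pvStepS_char, hp, List.dropWhile_cons, hnh, if_true]
      simpa using ih d
    · have hnh : pvNoHeader l = false := by simp [pvNoHeader, hp]
      simp only [List.foldl_cons, pvStepS_char, hp, List.dropWhile_cons, hnh]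
      rw [pvBGo.eq_def]
      simpa [pvFlushA, hp] using pvCollect t m [] d

-- ===== VERDICT (by name: the statement is the Claim_ definition above) =====
theorem parse_transformer_output_spec : Claim_equal_parse_transformer_output := by
  intro output_string _
  unfold Spec_parse_transformer_output parse_transformer_output parse_transformer_output_alt
  have hmap : ((PySem.Str.split? output_string "\n").getD []).foldl pvStepA
      (none, [], PySem.Dict.ofList [("summary", ""), ("tone", ""), ("improved_version", "")]) =
      (((PySem.Str.split? output_string "\n").getD []).map PySem.Str.strip).foldl pvStepS
      (none, [], PySem.Dict.ofList [("summary", ""), ("tone", ""), ("improved_version", "")]) := by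
    rw [List.foldl_map]
    rfl
  simp only [hmap, List.span_eq_takeWhile_dropWhile]
  exact congrArg PySem.Dict.items (pvTop _ _)
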